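-- pv_equiv track=rewrite | github.com/gersonraulb-sketch/ejedef | eje53.py | primeros_unicos
-- ===== SOURCE A (Python) =====
-- def primeros_unicos(lst,n):
--     res=[]
--     seen=set()
--     for x in lst:
--         if x not in seen:
--             res.append(x); seen.add(x)
--         if len(res)==n:
--             break
--     return res
-- ===== SOURCE B (Python) =====
-- def primeros_unicos(lst, n):
--     # Head-and-filter worklist (no seen-set): repeatedly take the head of the
--     # remaining worklist, delete its duplicates from it, decrement the budget;
--     # budget 1 is the natural stop (non-positive budgets count down forever,
--     # so all uniques are returned, as in A).
--     res = []
--     rest = lst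
--     while rest:
--         x = rest[0]
--         res.append(x)
--         if n == 1:
--             break
--         rest = [y for y in rest[1:] if y != x]
--         n -= 1
--     return res
-- ===== Notes on version B (the rewrite author's own statement) =====
-- stated objective: alternative
-- what changed: Replaces A's single-pass loop with a seen-set and break by a set-free structural recursion: take the head, filter its duplicates out of the tail, recurse with the budget decremented (stopping at budget 1; non-positive budgets count down forever, so all uniques are returned, matching A).
import Mathlib
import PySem

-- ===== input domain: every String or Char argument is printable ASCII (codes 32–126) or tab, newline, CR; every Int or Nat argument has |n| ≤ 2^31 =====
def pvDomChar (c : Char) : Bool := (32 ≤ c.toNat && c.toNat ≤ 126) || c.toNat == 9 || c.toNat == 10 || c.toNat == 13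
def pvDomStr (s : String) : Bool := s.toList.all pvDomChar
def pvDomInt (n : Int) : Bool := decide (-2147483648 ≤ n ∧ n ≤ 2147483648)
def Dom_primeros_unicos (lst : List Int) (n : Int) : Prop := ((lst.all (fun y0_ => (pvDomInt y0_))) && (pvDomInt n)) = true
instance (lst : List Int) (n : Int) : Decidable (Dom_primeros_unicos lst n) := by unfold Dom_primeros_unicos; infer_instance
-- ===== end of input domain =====

-- B replaces A's seen-set loop with break by a set-free head-and-filter worklist loop (alternative algorithm, not faster).

-- ===== PORT A =====
-- the 'for x in lst' loop with its 'break'; state = (res, seen)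
def pvLoopA : List Int → List Int → PySem.Set Int → Int → List Int
  | [], res, _, _ => res
  | x :: xs, res, seen, n =>
    let st := if !(PySem.Set.contains seen x) then (res ++ [x], PySem.Set.add seen x) else (res, seen)
    if (st.1.length : Int) = n then st.1 else pvLoopA xs st.1 st.2 n

def primeros_unicos (lst : List Int) (n : Int) : List Int :=
  pvLoopA lst [] PySem.Set.empty n

-- ===== PORT B =====
-- the 'while rest' loop; state = (rest, n, res)
def pvLoopB : List Int → Int → List Int → List Int
  | [], _, res => res
  | x :: t, n, res =>
    if n = 1 then res ++ [x]
    else pvLoopB (t.filter (fun y => y != x)) (n - 1) (res ++ [x])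
  termination_by rest _ _ => rest.length
  decreasing_by simpa using Nat.lt_succ_of_le (List.length_filter_le _ _)

def primeros_unicos_alt (lst : List Int) (n : Int) : List Int :=
  pvLoopB lst n []

-- ===== PRECONDITION & SPEC =====
def Spec_primeros_unicos (lst : List Int) (n : Int) (out : List Int) : Prop := out = primeros_unicos_alt lst n
instance (lst : List Int) (n : Int) (out : List Int) : Decidable (Spec_primeros_unicos lst n out) := by unfold Spec_primeros_unicos; infer_instance

-- ===== CLAIM (what is proved, stated in full; the proofs are below) =====
def Claim_equal_primeros_unicos : Prop := ∀ (lst : List Int) (n : Int), Dom_primeros_unicos lst n → Spec_primeros_unicos lst n (primeros_unicos lst n)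

-- ===== LEMMAS AND PROOFS =====

-- A's loop with collected prefix res (= seen) and budget n computes res followed by
-- B's recursion on the tail with the already-collected values filtered out and budget n - |res|.
lemma pvLoopA_eq : ∀ (lst res : List Int) (seen : PySem.Set Int) (n : Int),
    (∀ y, y ∈ seen ↔ y ∈ res) →
    (n ≤ 0 ∨ (res.length : Int) < n) →
    pvLoopA lst res seen n =
      pvLoopB (lst.filter (fun y => !res.contains y)) (n - res.length) res := by
  intro lst
  induction lst with
  | nil => intro res seen n _ _; simp [pvLoopA, pvLoopB]
  | cons x xs ih =>
    intro res seen n hseen hn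
    by_cases hx : x ∈ res
    · -- duplicate: filtered out on the B side, skipped on the A side
      have hc : PySem.Set.contains seen x = true := by
        simp only [PySem.Set.contains, List.contains_eq_mem, decide_eq_true_eq]
        exact (hseen x).mpr hx
      have hne : ¬ ((res.length : Int) = n) := by
        rcases hn with h | h
        · intro he
          have : 0 < res.length := List.length_pos_iff.mpr (by intro h'; subst h'; simp at hx)
          omega
        · omega
      simp only [pvLoopA, hc, Bool.not_true, Bool.false_eq_true, if_false, if_neg hne]
      rw [ih res seen n hseen hn]
      simp [hx]
    · -- new element
      have hc : PySem.Set.contains seen x = false := by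
        simp only [PySem.Set.contains, List.contains_eq_mem, decide_eq_false_iff_not]
        exact fun h => hx ((hseen x).mp h)
      have hfc : (x :: xs).filter (fun y => !res.contains y) =
          x :: xs.filter (fun y => !res.contains y) := by
        simp [hx]
      simp only [pvLoopA, hc, Bool.not_false, if_true]
      by_cases hbr : ((res ++ [x]).length : Int) = n
      · -- break fires: budget on the B side is exactly 1
        have h1 : n - (res.length : Int) = 1 := by simp at hbr; omega
        simp only [if_pos hbr, hfc]
        rw [pvLoopB, if_pos h1]
      · have h1 : ¬ (n - (res.length : Int) = 1) := by simp at hbr; omega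
        have hadd : PySem.Set.add seen x = seen ++ [x] := by
          simp only [PySem.Set.add, hc, Bool.false_eq_true, if_false]
        have hseen' : ∀ y, y ∈ PySem.Set.add seen x ↔ y ∈ res ++ [x] := by
          intro y; rw [hadd]; simp [hseen y]
        have hn' : n ≤ 0 ∨ (((res ++ [x]).length : Int)) < n := by
          rcases hn with h | h
          · exact Or.inl h
          · right; simp at hbr ⊢; omega
        simp only [if_neg hbr]
        rw [ih (res ++ [x]) (PySem.Set.add seen x) n hseen' hn', hfc]
        rw [pvLoopB, if_neg h1]
        have hpred : (xs.filter (fun y => !res.contains y)).filter (fun y => y != x) =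
            xs.filter (fun y => !(res ++ [x]).contains y) := by
          rw [List.filter_filter]
          apply List.filter_congr
          intro y _
          by_cases h1 : y ∈ res <;> by_cases h2 : y = x <;> simp [h1, h2, hx]
        have hlen : n - ((res ++ [x]).length : Int) = n - (res.length : Int) - 1 := by
          simp; omega
        rw [hpred, ← hlen]

-- ===== VERDICT (by name: the statement is the Claim_ definition above) =====
theorem primeros_unicos_spec : Claim_equal_primeros_unicos := by
  intro lst n _
  unfold Spec_primeros_unicos primeros_unicos
  have hseen : ∀ y, y ∈ (PySem.Set.empty (α := Int)) ↔ y ∈ ([] : List Int) := by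
    intro y; simp [PySem.Set.empty]
  have hn : n ≤ 0 ∨ ((([] : List Int).length : Int) < n) := by
    by_cases h : 0 < n
    · right; simpa using h
    · left; omega
  rw [pvLoopA_eq lst [] PySem.Set.empty n hseen hn]
  simp [primeros_unicos_alt]
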